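-- pv_equiv track=rewrite | github.com/LectureHubTeam/codemath-skills | skills/cp-solver/workspace/23ckththn3_solution_v2.py | find_min_base_greater
-- ===== SOURCE A (Python) =====
-- def compare_cyclic_with_string(base_str: str, k: int, target: str) -> int:
--     """
--     Compare repeat(base_str, k) with target without full construction.
--     Returns: -1 if < target, 0 if == target, 1 if > target
--
--     Key optimization: Only compare character by character, no full string build.
--     """
--     N = len(base_str)
--     total_len = N * k
--     target_len = len(target)
--
--     # Length comparison first
--     if total_len < target_len:
--         return -1
--     if total_len > target_len:
--         return 1
--
--     # Same length - compare character by character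
--     # repeat(base_str, k)[i] = base_str[i % N]
--     for i in range(total_len):
--         c_cyclic = base_str[i % N]
--         c_target = target[i]
--         if c_cyclic < c_target:
--             return -1
--         if c_cyclic > c_target:
--             return 1
--
--     return 0
--
-- def find_min_base_greater(N: int, k: int, L: str) -> int:
--     """
--     Find minimum N-digit base B such that repeat(B, k) > L.
--     Returns -1 if no such base exists.
--     """
--     total_len = k * N
--
--     if total_len < len(L):
--         return -1
--
--     lo = 10**(N-1)
--     hi = 10**N - 1
--     result = -1
--
--     while lo <= hi:
--         mid = (lo + hi) // 2
--         mid_str = str(mid)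
--
--         cmp = compare_cyclic_with_string(mid_str, k, L)
--         if cmp > 0:  # mid works (repeat(mid, k) > L)
--             result = mid
--             hi = mid - 1
--         else:
--             lo = mid + 1
--
--     return result
-- ===== SOURCE B (Python) =====
-- def find_min_base_greater(N: int, k: int, L: str) -> int:
--     """
--     Find minimum N-digit base B such that repeat(B, k) > L.
--     Returns -1 if no such base exists.
--
--     Builds the smallest feasible base digit by digit: a prefix is feasible
--     iff padding it with nines makes the repetition exceed L.
--     """
--     total = k * N
--     if total < len(L):
--         return -1
--     if N < 1 or k < 1:
--         return -1  # no N-digit base / no repetition can exceed L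
--     if total > len(L):
--         return 10 ** (N - 1)
--     head = L[:N]
--     tail_ok = head * k > L
--     v = 0
--     for i in range(N):
--         for d in range(1 if i == 0 else 0, 10):
--             w = 10 * v + d
--             s = str(w) + "9" * (N - 1 - i)
--             if s > head or (tail_ok and s == head):
--                 v = w
--                 break
--         else:
--             return -1
--     return v
-- ===== Notes on version B (the rewrite author's own statement) =====
-- stated objective: faster
-- what changed: Replaces A's binary search over all N-digit bases (about 3.3N probes, each building str(mid) and re-comparing the k-fold repeat against L) by a greedy digit-by-digit construction of the smallest feasible base: a prefix is kept iff padding it with nines makes the repetition exceed L.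
import Mathlib
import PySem

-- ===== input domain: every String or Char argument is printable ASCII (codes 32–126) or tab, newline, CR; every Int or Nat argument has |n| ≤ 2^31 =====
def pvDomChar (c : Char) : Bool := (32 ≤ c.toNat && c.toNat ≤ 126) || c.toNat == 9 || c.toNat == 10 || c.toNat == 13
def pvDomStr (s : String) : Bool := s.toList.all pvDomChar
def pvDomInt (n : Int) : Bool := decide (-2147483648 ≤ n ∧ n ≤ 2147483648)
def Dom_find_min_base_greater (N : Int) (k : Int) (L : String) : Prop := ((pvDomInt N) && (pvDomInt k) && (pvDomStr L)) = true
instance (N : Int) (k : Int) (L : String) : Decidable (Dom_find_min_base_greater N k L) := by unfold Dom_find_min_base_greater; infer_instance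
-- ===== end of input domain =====

-- B replaces A's binary search over all N-digit bases by a greedy digit-by-digit
-- construction of the smallest feasible base (objective: faster, measured).

-- ===== PORT A =====

-- the character loop of compare_cyclic_with_string: for i in range(total): …
def cmpLoop (b t : List Char) (n : Nat) : Nat → Nat → Int
  | _, 0 => 0
  | i, fuel + 1 =>
    let cc := b.getD (i % n) ' '      -- base_str[i % N]; always in range when reached
    let ct := t.getD i ' '            -- target[i]; always in range when reached
    if cc < ct then -1
    else if ct < cc then 1
    else cmpLoop b t n (i + 1) fuel

-- compare_cyclic_with_string(base_str, k, target)
def cmpCyclic (b : List Char) (k : Int) (t : List Char) : Int :=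
  let total : Int := (b.length : Int) * k
  let tlen : Int := (t.length : Int)
  if total < tlen then -1
  else if tlen < total then 1
  else cmpLoop b t b.length 0 t.length

-- the while lo <= hi binary-search loop of A
def bsA (k : Int) (t : List Char) (lo hi res : Int) : Int :=
  if h : lo ≤ hi then
    let mid := PySem.Int.floordiv (lo + hi) 2
    if 0 < cmpCyclic (PySem.Int.toChars mid) k t then
      bsA k t lo (mid - 1) mid
    else
      bsA k t (mid + 1) hi res
  else res
termination_by (hi + 1 - lo).toNat
decreasing_by
  · have hb := PySem.Int.floordiv_two_mid_bounds h; omega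
  · have hb := PySem.Int.floordiv_two_mid_bounds h; omega

def find_min_base_greater (N : Int) (k : Int) (L : String) : Int :=
  let total := k * N
  if total < (L.toList.length : Int) then -1
  else if N ≤ 0 then -1
    -- Python computes lo = 10**(N-1) here; for N ≤ 0 that is a float in (0,1] while
    -- hi = 10**N - 1 ≤ 0, so `while lo <= hi` is false at once and A returns -1: exact.
  else
    bsA k L.toList ((10:Int) ^ (N - 1).toNat) ((10:Int) ^ N.toNat - 1) (-1)

-- ===== PORT B =====

-- Python string `<` (lexicographic on code points, a proper prefix is smaller): exact
def lexLt : List Char → List Char → Bool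
  | [], [] => false
  | [], _ :: _ => true
  | _ :: _, [] => false
  | x :: xs, y :: ys => if x < y then true else if y < x then false else lexLt xs ys

-- B's inner loop: for d in range(start, 10): … (d counts up, fuel = 10 - start)
def innerLoop (head : List Char) (tailOk : Bool) (r : Nat) (v : Int) : Nat → Nat → Option Int
  | _, 0 => none
  | d, fuel + 1 =>
    let w := 10 * v + (d : Int)
    let s := PySem.Int.toChars w ++ List.replicate r '9'
    if lexLt head s || (tailOk && decide (s = head)) then some w
    else innerLoop head tailOk r v (d + 1) fuel

-- B's outer loop: for i in range(N): …  (rem = N - i digits still to choose)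
def buildLoop (head : List Char) (tailOk : Bool) : Nat → Nat → Int → Option Int
  | 0, _, v => some v
  | rem + 1, i, v =>
    match innerLoop head tailOk rem v (if i = 0 then 1 else 0) (if i = 0 then 9 else 10) with
    | some w => buildLoop head tailOk rem (i + 1) w
    | none => none

def find_min_base_greater_alt (N : Int) (k : Int) (L : String) : Int :=
  let Ls := L.toList
  let total := k * N
  if total < (Ls.length : Int) then -1
  else if N < 1 ∨ k < 1 then -1   -- no N-digit base / no repetition can exceed L
  else if (Ls.length : Int) < total then (10:Int) ^ (N - 1).toNat
  else
    let head := Ls.take N.toNat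
    let tailOk := lexLt Ls (List.flatten (List.replicate k.toNat head))
    match buildLoop head tailOk N.toNat 0 0 with
    | some v => v
    | none => -1

-- ===== PRECONDITION & SPEC =====
def Spec_find_min_base_greater (N : Int) (k : Int) (L : String) (out : Int) : Prop :=
  out = find_min_base_greater_alt N k L
instance (N : Int) (k : Int) (L : String) (out : Int) : Decidable (Spec_find_min_base_greater N k L out) := by
  unfold Spec_find_min_base_greater; infer_instance

-- ===== CLAIM =====
def Claim_equal_find_min_base_greater : Prop :=
  ∀ (N : Int) (k : Int) (L : String), Dom_find_min_base_greater N k L →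
    Spec_find_min_base_greater N k L (find_min_base_greater N k L)

-- ===== LEMMAS AND PROOFS =====

-- ---------- Char order bridge ----------

theorem cLt (a b : Char) : a < b ↔ a.toNat < b.toNat := by
  rw [Char.lt_def, UInt32.lt_iff_toNat_lt]; rfl

theorem cEq (a b : Char) : ¬ a < b → ¬ b < a → a = b := by
  intro h1 h2
  rcases lt_trichotomy a b with h | h | h
  · exact absurd h h1
  · exact h
  · exact absurd h h2

-- ---------- digit strings and their numeric value ----------

def digs (cs : List Char) : Prop := ∀ c ∈ cs, 48 ≤ c.toNat ∧ c.toNat ≤ 57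

def val : List Char → Int
  | [] => 0
  | c :: cs => ((c.toNat : Int) - 48) * (10:Int) ^ cs.length + val cs

theorem val_cons (c : Char) (cs : List Char) :
    val (c :: cs) = ((c.toNat : Int) - 48) * (10:Int) ^ cs.length + val cs := rfl

theorem val_nonneg {cs : List Char} (h : digs cs) : 0 ≤ val cs := by
  induction cs with
  | nil => simp [val]
  | cons c cs ih =>
    have hc := h c (by simp)
    have hrest : digs cs := fun x hx => h x (by simp [hx])
    have h1 : (0:Int) ≤ ((c.toNat : Int) - 48) := by omega
    have h2 : (0:Int) ≤ (10:Int) ^ cs.length := by positivity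
    have := ih hrest
    rw [val_cons]
    nlinarith

theorem val_lt {cs : List Char} (h : digs cs) : val cs < (10:Int) ^ cs.length := by
  induction cs with
  | nil => simp [val]
  | cons c cs ih =>
    have hc := h c (by simp)
    have hrest : digs cs := fun x hx => h x (by simp [hx])
    have h1 : ((c.toNat : Int) - 48) ≤ 9 := by omega
    have h2 : (0:Int) < (10:Int) ^ cs.length := by positivity
    have := ih hrest
    rw [val_cons]
    have : ((c.toNat : Int) - 48) * (10:Int) ^ cs.length ≤ 9 * (10:Int) ^ cs.length :=
      mul_le_mul_of_nonneg_right h1 (le_of_lt h2)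
    calc ((c.toNat : Int) - 48) * (10:Int) ^ cs.length + val cs
        < ((c.toNat : Int) - 48) * (10:Int) ^ cs.length + (10:Int) ^ cs.length := by
          linarith [ih hrest]
      _ ≤ 10 * (10:Int) ^ cs.length := by nlinarith
      _ = (10:Int) ^ (cs.length + 1) := by ring
      _ = (10:Int) ^ (c :: cs).length := by simp

theorem val_append (a b : List Char) :
    val (a ++ b) = val a * (10:Int) ^ b.length + val b := by
  induction a with
  | nil => simp [val]
  | cons c cs ih =>
    simp only [List.cons_append, val_cons, List.length_append, ih]
    ring

theorem val_lead {c : Char} {cs : List Char} (h : digs (c :: cs)) (hc : 49 ≤ c.toNat) :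
    (10:Int) ^ cs.length ≤ val (c :: cs) := by
  have hrest : digs cs := fun x hx => h x (by simp [hx])
  have h1 : (1:Int) ≤ ((c.toNat : Int) - 48) := by omega
  have h2 : (0:Int) < (10:Int) ^ cs.length := by positivity
  have h3 := val_nonneg hrest
  rw [val_cons]
  nlinarith

-- ---------- three-way lexicographic comparison ----------

def listCmp : List Char → List Char → Int
  | x :: xs, y :: ys =>
    if x < y then -1 else if y < x then 1 else listCmp xs ys
  | _, _ => 0

theorem listCmp_trichot (a b : List Char) :
    listCmp a b = -1 ∨ listCmp a b = 0 ∨ listCmp a b = 1 := by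
  induction a generalizing b with
  | nil => cases b <;> simp [listCmp]
  | cons x xs ih =>
    cases b with
    | nil => simp [listCmp]
    | cons y ys =>
      by_cases h1 : x < y
      · simp [listCmp, h1]
      · by_cases h2 : y < x
        · simp [listCmp, h1, h2]
        · simpa [listCmp, h1, h2] using ih ys

theorem listCmp_zero_iff {a b : List Char} (h : a.length = b.length) :
    listCmp a b = 0 ↔ a = b := by
  induction a generalizing b with
  | nil =>
    cases b with
    | nil => simp [listCmp]
    | cons y ys => simp at h
  | cons x xs ih =>
    cases b with
    | nil => simp at h
    | cons y ys =>
      simp only [List.length_cons, Nat.add_right_cancel_iff] at h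
      by_cases h1 : x < y
      · simp [listCmp, h1]
        intro he; subst he; exact absurd h1 (lt_irrefl _)
      · by_cases h2 : y < x
        · simp [listCmp, h1, h2]
          intro he; subst he; exact absurd h2 (lt_irrefl _)
        · have hxy := cEq x y h1 h2
          subst hxy
          simp [listCmp, ih h]

theorem listCmp_neg (a b : List Char) : listCmp b a = - listCmp a b := by
  induction a generalizing b with
  | nil => cases b <;> simp [listCmp]
  | cons x xs ih =>
    cases b with
    | nil => simp [listCmp]
    | cons y ys =>
      by_cases h1 : x < y
      · have h2 : ¬ y < x := lt_asymm h1
        simp [listCmp, h1, h2]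
      · by_cases h2 : y < x
        · simp [listCmp, h1, h2]
        · simp [listCmp, h1, h2, ih ys]

theorem lexLt_iff_cmp {a b : List Char} (h : a.length = b.length) :
    lexLt a b = true ↔ listCmp a b = -1 := by
  induction a generalizing b with
  | nil =>
    cases b with
    | nil => simp [lexLt, listCmp]
    | cons y ys => simp at h
  | cons x xs ih =>
    cases b with
    | nil => simp at h
    | cons y ys =>
      simp only [List.length_cons, Nat.add_right_cancel_iff] at h
      by_cases h1 : x < y
      · simp [lexLt, listCmp, h1]
      · by_cases h2 : y < x
        · simp [lexLt, listCmp, h1, h2]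
        · simp [lexLt, listCmp, h1, h2, ih h]

theorem listCmp_append {p q : List Char} (x y : List Char) (h : p.length = q.length) :
    listCmp (p ++ x) (q ++ y) =
      if listCmp p q = 0 then listCmp x y else listCmp p q := by
  induction p generalizing q with
  | nil =>
    cases q with
    | nil => simp [listCmp]
    | cons z zs => simp at h
  | cons c cs ih =>
    cases q with
    | nil => simp at h
    | cons z zs =>
      simp only [List.length_cons, Nat.add_right_cancel_iff] at h
      by_cases h1 : c < z
      · simp [listCmp, h1]
      · by_cases h2 : z < c
        · simp [listCmp, h1, h2]
        · simp [listCmp, h1, h2, ih h]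

-- value vs lexicographic order on equal-length digit strings

theorem val_head_lt {x y : Char} {xs ys : List Char} (hx : digs (x :: xs))
    (hy : digs (y :: ys)) (hl : xs.length = ys.length) (hlt : x < y) :
    val (x :: xs) < val (y :: ys) := by
  have hdx : digs xs := fun c hc => hx c (by simp [hc])
  have hdy : digs ys := fun c hc => hy c (by simp [hc])
  have h1 := val_lt hdx
  have h2 := val_nonneg hdy
  have hxy : (x.toNat : Int) < y.toNat := by exact_mod_cast (cLt x y).mp hlt
  rw [val_cons, val_cons, hl]
  have hp : (0:Int) < (10:Int) ^ ys.length := by positivity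
  rw [hl] at h1
  nlinarith

theorem listCmp_val {a b : List Char} (ha : digs a) (hb : digs b)
    (h : a.length = b.length) : listCmp a b = -1 ↔ val a < val b := by
  induction a generalizing b with
  | nil =>
    cases b with
    | nil => simp [listCmp, val]
    | cons y ys => simp at h
  | cons x xs ih =>
    cases b with
    | nil => simp at h
    | cons y ys =>
      have hl : xs.length = ys.length := by simpa using h
      have hdx : digs xs := fun c hc => ha c (by simp [hc])
      have hdy : digs ys := fun c hc => hb c (by simp [hc])
      by_cases h1 : x < y
      · have := val_head_lt ha hb hl h1
        simp [listCmp, h1, this]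
      · by_cases h2 : y < x
        · simp only [listCmp, if_neg h1, if_pos h2]
          constructor
          · intro hc; exact absurd hc (by norm_num)
          · intro hv
            exact absurd (val_head_lt hb ha hl.symm h2) (by linarith)
        · have hxy := cEq x y h1 h2
          subst hxy
          simp only [listCmp, lt_irrefl, if_false]
          rw [ih hdx hdy hl]
          rw [val_cons, val_cons, hl]
          constructor <;> intro hv <;> linarith

theorem listCmp_one_val {a b : List Char} (ha : digs a) (hb : digs b)
    (h : a.length = b.length) : listCmp a b = 1 ↔ val b < val a := by
  have := listCmp_val hb ha h.symm
  rw [listCmp_neg a b] at this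
  constructor
  · intro h1; exact this.mp (by omega)
  · intro h1; have := this.mpr h1; omega

-- ---------- decimal representation: Nat.toDigits 10 as a structural recursion ----------

def decRep (n : Nat) : List Char :=
  if n < 10 then [Nat.digitChar n]
  else decRep (n / 10) ++ [Nat.digitChar (n % 10)]
termination_by n
decreasing_by exact Nat.div_lt_self (by omega) (by omega)

theorem digitChar_toNat {d : Nat} (h : d < 10) : (Nat.digitChar d).toNat = 48 + d := by
  interval_cases d <;> decide

theorem digitChar_digit {d : Nat} (h : d < 10) :
    48 ≤ (Nat.digitChar d).toNat ∧ (Nat.digitChar d).toNat ≤ 57 := by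
  rw [digitChar_toNat h]; omega

theorem toDigitsCore_eq_decRep (f : Nat) : ∀ n acc, n < f →
    Nat.toDigitsCore 10 f n acc = decRep n ++ acc := by
  induction f with
  | zero => intro n acc h; omega
  | succ f ih =>
    intro n acc h
    by_cases h10 : n < 10
    · have hz : n / 10 = 0 := Nat.div_eq_of_lt h10
      have hm : n % 10 = n := Nat.mod_eq_of_lt h10
      simp [Nat.toDigitsCore, hz, hm, decRep, h10]
    · have hz : ¬ n / 10 = 0 := by omega
      have hlt : n / 10 < f := by
        have h1 : n / 10 < n := Nat.div_lt_self (by omega) (by omega)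
        omega
      simp only [Nat.toDigitsCore, hz, if_false]
      rw [ih (n / 10) _ hlt]
      conv_rhs => rw [decRep]
      rw [if_neg h10]
      simp

theorem toDigits_eq_decRep (n : Nat) : Nat.toDigits 10 n = decRep n := by
  rw [Nat.toDigits, toDigitsCore_eq_decRep (n + 1) n [] (by omega)]
  simp

theorem toChars_eq {v : Int} (h : 0 ≤ v) :
    PySem.Int.toChars v = decRep v.toNat := by
  rw [PySem.Int.toChars, if_neg (by omega), toDigits_eq_decRep]

theorem decRep_ne_nil (n : Nat) : decRep n ≠ [] := by
  rw [decRep]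
  split <;> simp

theorem decRep_digs (n : Nat) : digs (decRep n) := by
  induction n using Nat.strong_induction_on with
  | _ n ih =>
    rw [decRep]
    split
    · intro c hc
      simp at hc
      subst hc
      exact digitChar_digit (by omega)
    · intro c hc
      rw [List.mem_append] at hc
      rcases hc with hc | hc
      · exact ih (n / 10) (Nat.div_lt_self (by omega) (by omega)) c hc
      · simp at hc
        subst hc
        exact digitChar_digit (Nat.mod_lt _ (by omega))

theorem decRep_val (n : Nat) : val (decRep n) = (n : Int) := by
  induction n using Nat.strong_induction_on with
  | _ n ih =>
    rw [decRep]
    split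
    · rename_i h10
      simp [val, digitChar_toNat h10]
    · rename_i h10
      rw [val_append, ih (n / 10) (Nat.div_lt_self (by omega) (by omega))]
      have hm : n % 10 < 10 := Nat.mod_lt _ (by omega)
      simp [val, digitChar_toNat hm]
      omega

theorem decRep_head (n : Nat) (h : 1 ≤ n) :
    ∃ c cs, decRep n = c :: cs ∧ 49 ≤ c.toNat := by
  induction n using Nat.strong_induction_on with
  | _ n ih =>
    rw [decRep]
    split
    · rename_i h10
      exact ⟨_, _, rfl, by rw [digitChar_toNat h10]; omega⟩
    · rename_i h10
      have h1 : 1 ≤ n / 10 := by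
        rw [Nat.le_div_iff_mul_le (by omega)]
        omega
      obtain ⟨c, cs, he, hc⟩ := ih (n / 10) (Nat.div_lt_self (by omega) (by omega)) h1
      exact ⟨c, cs ++ [Nat.digitChar (n % 10)], by rw [he]; simp, hc⟩

theorem decRep_lower (n : Nat) (h : 1 ≤ n) :
    (10:Int) ^ ((decRep n).length - 1) ≤ (n : Int) := by
  obtain ⟨c, cs, he, hc⟩ := decRep_head n h
  have hd : digs (c :: cs) := he ▸ decRep_digs n
  have := val_lead hd hc
  rw [← decRep_val n, he]
  simpa using this

theorem decRep_upper (n : Nat) : (n : Int) < (10:Int) ^ (decRep n).length := by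
  rw [← decRep_val n]
  exact val_lt (decRep_digs n)

theorem decRep_length {v : Int} {m : Nat} (hm : 1 ≤ m)
    (h1 : (10:Int) ^ (m - 1) ≤ v) (h2 : v ≤ (10:Int) ^ m - 1) :
    (decRep v.toNat).length = m := by
  have hp : (1:Int) ≤ (10:Int) ^ (m - 1) := one_le_pow₀ (by norm_num)
  have hv1 : 1 ≤ v.toNat := by omega
  have hcast : ((v.toNat : Int)) = v := Int.toNat_of_nonneg (by omega)
  have hlow := decRep_lower v.toNat hv1
  have hup := decRep_upper v.toNat
  rw [hcast] at hlow hup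
  set l := (decRep v.toNat).length with hl
  have hl1 : 1 ≤ l := by
    have := decRep_ne_nil v.toNat
    cases he : decRep v.toNat with
    | nil => exact absurd he this
    | cons c cs => rw [hl, he]; simp
  by_contra hne
  rcases Nat.lt_or_ge l m with hlt | hge
  · have : (10:Int) ^ l ≤ (10:Int) ^ (m - 1) :=
      pow_le_pow_right₀ (by norm_num) (by omega)
    linarith
  · have hgt : m < l := by omega
    have : (10:Int) ^ m ≤ (10:Int) ^ (l - 1) :=
      pow_le_pow_right₀ (by norm_num) (by omega)
    linarith

-- facts about str(v) for an N-digit v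

theorem sv_digs {v : Int} (h : 0 ≤ v) : digs (PySem.Int.toChars v) := by
  rw [toChars_eq h]; exact decRep_digs _

theorem sv_val {v : Int} (h : 0 ≤ v) : val (PySem.Int.toChars v) = v := by
  rw [toChars_eq h, decRep_val]
  exact Int.toNat_of_nonneg h

theorem sv_length {v : Int} {m : Nat} (hm : 1 ≤ m)
    (h1 : (10:Int) ^ (m - 1) ≤ v) (h2 : v ≤ (10:Int) ^ m - 1) :
    (PySem.Int.toChars v).length = m := by
  have hp : (1:Int) ≤ (10:Int) ^ (m - 1) := one_le_pow₀ (by norm_num)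
  rw [toChars_eq (by omega)]
  exact decRep_length hm h1 h2

-- ---------- the comparison loop of A ----------

theorem cmpLoop_split (b t : List Char) (n : Nat) (f1 f2 : Nat) : ∀ i,
    cmpLoop b t n i (f1 + f2) =
      (if cmpLoop b t n i f1 = 0 then cmpLoop b t n (i + f1) f2
       else cmpLoop b t n i f1) := by
  induction f1 with
  | zero => intro i; simp [cmpLoop]
  | succ f ih =>
    intro i
    have hr : (f + 1) + f2 = (f + f2) + 1 := by omega
    rw [hr]
    simp only [cmpLoop]
    by_cases h1 : b.getD (i % n) ' ' < t.getD i ' '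
    · simp only [if_pos h1, if_neg (show ¬(-1 : Int) = 0 by norm_num)]
    · by_cases h2 : t.getD i ' ' < b.getD (i % n) ' '
      · simp only [if_neg h1, if_pos h2, if_neg (show ¬(1 : Int) = 0 by norm_num)]
      · simp only [if_neg h1, if_neg h2]
        rw [ih (i + 1)]
        have he : i + (f + 1) = (i + 1) + f := by omega
        rw [he]

theorem cmpLoop_trichot (b t : List Char) (n : Nat) : ∀ f i,
    cmpLoop b t n i f = -1 ∨ cmpLoop b t n i f = 0 ∨ cmpLoop b t n i f = 1 := by
  intro f
  induction f with
  | zero => intro i; simp [cmpLoop]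
  | succ f ih =>
    intro i
    simp only [cmpLoop]
    by_cases h1 : b.getD (i % n) ' ' < t.getD i ' '
    · rw [if_pos h1]; norm_num
    · by_cases h2 : t.getD i ' ' < b.getD (i % n) ' '
      · rw [if_neg h1, if_pos h2]; norm_num
      · rw [if_neg h1, if_neg h2]; exact ih (i + 1)

theorem cmpLoop_eq_listCmp (b t : List Char) : ∀ (f i : Nat),
    i + f ≤ b.length → i + f ≤ t.length →
    cmpLoop b t b.length i f = listCmp ((b.drop i).take f) ((t.drop i).take f) := by
  intro f
  induction f with
  | zero => intro i _ _; simp [cmpLoop, listCmp]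
  | succ f ih =>
    intro i hb ht
    have hib : i < b.length := by omega
    have hit : i < t.length := by omega
    rw [List.drop_eq_getElem_cons hib, List.drop_eq_getElem_cons hit]
    simp only [List.take_succ_cons]
    simp only [cmpLoop, listCmp]
    have hgb : b.getD (i % b.length) ' ' = b[i] := by
      rw [Nat.mod_eq_of_lt hib]
      simp [List.getElem?_eq_getElem hib]
    have hgt : t.getD i ' ' = t[i] := by
      simp [List.getElem?_eq_getElem hit]
    rw [hgb, hgt]
    by_cases h1 : b[i] < t[i]
    · simp only [if_pos h1]
    · by_cases h2 : t[i] < b[i]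
      · simp only [if_neg h1, if_pos h2]
      · simp only [if_neg h1, if_neg h2]
        exact ih (i + 1) (by omega) (by omega)

-- the loop with its target shifted by one block: index arithmetic only
theorem cmpLoop_shift (b t : List Char) (n : Nat) : ∀ f i,
    cmpLoop b t n (i + n) f = cmpLoop b (t.drop n) n i f := by
  intro f
  induction f with
  | zero => intro i; simp [cmpLoop]
  | succ f ih =>
    intro i
    simp only [cmpLoop]
    have h1 : (i + n) % n = i % n := Nat.add_mod_right i n
    have h2 : t.getD (i + n) ' ' = (t.drop n).getD i ' ' := by
      simp [List.getD, List.getElem?_drop, Nat.add_comm]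
    rw [h1, h2]
    by_cases hc1 : b.getD (i % n) ' ' < (t.drop n).getD i ' '
    · simp only [if_pos hc1]
    · by_cases hc2 : (t.drop n).getD i ' ' < b.getD (i % n) ' '
      · simp only [if_neg hc1, if_pos hc2]
      · simp only [if_neg hc1, if_neg hc2]
        have he : i + n + 1 = (i + 1) + n := by omega
        rw [he, ih (i + 1)]

-- ---------- the binary search of A ----------

theorem bsA_none (k : Int) (t : List Char) (lo hi res : Int)
    (h : ∀ v, lo ≤ v → v ≤ hi → ¬ 0 < cmpCyclic (PySem.Int.toChars v) k t) :
    bsA k t lo hi res = res := by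
  suffices H : ∀ (M : Nat) (lo hi res : Int), (hi + 1 - lo).toNat = M →
      (∀ v, lo ≤ v → v ≤ hi → ¬ 0 < cmpCyclic (PySem.Int.toChars v) k t) →
      bsA k t lo hi res = res by
    exact H (hi + 1 - lo).toNat lo hi res rfl h
  intro M
  induction M using Nat.strong_induction_on with
  | _ M ih =>
    intro lo hi res hM h
    rw [bsA]
    split
    · rename_i hle
      have hb := PySem.Int.floordiv_two_mid_bounds hle
      rw [if_neg (h _ hb.1 hb.2)]
      exact ih (hi + 1 - (PySem.Int.floordiv (lo + hi) 2 + 1)).toNat (by omega) _ _ _ rfl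
        (fun v h1 h2 => h v (by omega) h2)
    · rfl

theorem bsA_found (k : Int) (t : List Char) (m lo hi res : Int)
    (hm1 : lo ≤ m) (hm2 : m ≤ hi)
    (h : ∀ v, lo ≤ v → v ≤ hi → (0 < cmpCyclic (PySem.Int.toChars v) k t ↔ m ≤ v)) :
    bsA k t lo hi res = m := by
  suffices H : ∀ (M : Nat) (lo hi res : Int), (hi + 1 - lo).toNat = M → lo ≤ m → m ≤ hi →
      (∀ v, lo ≤ v → v ≤ hi → (0 < cmpCyclic (PySem.Int.toChars v) k t ↔ m ≤ v)) →
      bsA k t lo hi res = m by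
    exact H (hi + 1 - lo).toNat lo hi res rfl hm1 hm2 h
  intro M
  induction M using Nat.strong_induction_on with
  | _ M ih =>
    intro lo hi res hM hm1 hm2 h
    have hle : lo ≤ hi := le_trans hm1 hm2
    rw [bsA, dif_pos hle]
    have hb := PySem.Int.floordiv_two_mid_bounds hle
    by_cases hm : m ≤ PySem.Int.floordiv (lo + hi) 2
    · rw [if_pos ((h _ hb.1 hb.2).mpr hm)]
      by_cases hm' : m ≤ PySem.Int.floordiv (lo + hi) 2 - 1
      · exact ih (PySem.Int.floordiv (lo + hi) 2 - 1 + 1 - lo).toNat (by omega) _ _ _ rfl hm1 hm'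
          (fun v h1 h2 => h v h1 (by omega))
      · rw [bsA_none k t lo (PySem.Int.floordiv (lo + hi) 2 - 1) _
          (fun v h1 h2 => by rw [h v h1 (by omega)]; omega)]
        omega
    · rw [if_neg (by rw [h _ hb.1 hb.2]; omega)]
      exact ih (hi + 1 - (PySem.Int.floordiv (lo + hi) 2 + 1)).toNat (by omega) _ _ _ rfl
        (by omega) hm2 (fun v h1 h2 => h v (by omega) h2)

-- ---------- B-side repeat comparison ----------

theorem flatten_replicate_length (m : Nat) (l : List Char) :
    (List.flatten (List.replicate m l)).length = m * l.length := by
  induction m with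
  | zero => simp
  | succ m ih =>
    simp [List.replicate_succ, ih, Nat.succ_mul]
    omega

theorem repCmp (t0 : List Char) : ∀ (m : Nat) (t : List Char),
    t.length = m * t0.length →
    listCmp (List.flatten (List.replicate m t0)) t = cmpLoop t0 t t0.length 0 t.length := by
  intro m
  induction m with
  | zero =>
    intro t ht
    have : t = [] := List.length_eq_zero_iff.mp (by omega)
    subst this
    simp [listCmp, cmpLoop]
  | succ m ih =>
    intro t ht
    rw [Nat.succ_mul] at ht
    have hnt : t0.length ≤ t.length := by omega
    have hsum : t0.length + (t.length - t0.length) = t.length := by omega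
    have hsplit := cmpLoop_split t0 t t0.length t0.length (t.length - t0.length) 0
    rw [hsum] at hsplit
    simp only [Nat.zero_add] at hsplit
    have hfirst : cmpLoop t0 t t0.length 0 t0.length = listCmp t0 (t.take t0.length) := by
      have h := cmpLoop_eq_listCmp t0 t t0.length 0 (by omega) (by omega)
      rw [h]
      simp [List.take_of_length_le (le_refl t0.length)]
    have hshift : cmpLoop t0 t t0.length t0.length (t.length - t0.length) =
        cmpLoop t0 (t.drop t0.length) t0.length 0 (t.length - t0.length) := by
      have := cmpLoop_shift t0 t t0.length (t.length - t0.length) 0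
      simpa using this
    have hdlen : (t.drop t0.length).length = t.length - t0.length := by simp
    have hrec : cmpLoop t0 (t.drop t0.length) t0.length 0 (t.length - t0.length) =
        listCmp (List.flatten (List.replicate m t0)) (t.drop t0.length) := by
      rw [← hdlen, ← ih (t.drop t0.length) (by rw [hdlen]; have := Nat.succ_mul m t0.length; omega)]
    have hflat : List.flatten (List.replicate (m + 1) t0) =
        t0 ++ List.flatten (List.replicate m t0) := by
      simp [List.replicate_succ]
    rw [hflat]
    conv_lhs => rw [show t = t.take t0.length ++ t.drop t0.length from (List.take_append_drop _ t).symm]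
    rw [listCmp_append _ _ (by simp [List.length_take]; omega)]
    rw [hsplit, hfirst, hshift, hrec]

theorem listCmp_trans_one {a b c : List Char} :
    listCmp a b = 1 → listCmp b c = 1 → listCmp a c = 1 := by
  induction a generalizing b c with
  | nil =>
    intro h1
    cases b <;> simp [listCmp] at h1
  | cons x xs ih =>
    intro h1 h2
    cases b with
    | nil => simp [listCmp] at h1
    | cons y ys =>
      cases c with
      | nil => simp [listCmp] at h2
      | cons z zs =>
        by_cases hxy : x < y
        · simp [listCmp, hxy] at h1
        · by_cases hyz : y < z
          · simp [listCmp, hyz] at h2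
          · by_cases hyx : y < x
            · by_cases hzy : z < y
              · have hzx : z < x := lt_trans hzy hyx
                simp [listCmp, lt_asymm hzx, hzx]
              · have hyz' : y = z := cEq y z hyz hzy
                subst hyz'
                simp [listCmp, lt_asymm hyx, hyx]
            · have hxy' : x = y := cEq x y hxy hyx
              subst hxy'
              by_cases hzx : z < x
              · simp [listCmp, lt_asymm hzx, hzx]
              · have hxz : x = z := cEq x z (by exact fun h => hyz h) hzx
                subst hxz
                simp only [listCmp, lt_irrefl, if_false] at h1 h2 ⊢
                exact ih h1 h2

theorem eq_of_val_eq {a b : List Char} (ha : digs a) (hb : digs b)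
    (h : a.length = b.length) (hv : val a = val b) : a = b := by
  rcases listCmp_trichot a b with hc | hc | hc
  · have := (listCmp_val ha hb h).mp hc; omega
  · exact (listCmp_zero_iff h).mp hc
  · have := (listCmp_one_val ha hb h).mp hc; omega

theorem val_replicate_nine (m : Nat) : val (List.replicate m '9') = (10:Int) ^ m - 1 := by
  induction m with
  | zero => simp [val]
  | succ m ih =>
    simp only [List.replicate_succ, val_cons, ih, List.length_replicate]
    have : ('9' : Char).toNat = 57 := by decide
    rw [this]
    push_cast
    ring

theorem digs_replicate_nine (m : Nat) : digs (List.replicate m '9') := by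
  intro c hc
  have := List.eq_of_mem_replicate hc
  subst this
  decide

theorem pow_lo_le_hi (n : Nat) (hn : 1 ≤ n) : (10:Int) ^ (n - 1) ≤ (10:Int) ^ n - 1 := by
  have h9 : (1:Int) ≤ (10:Int) ^ (n - 1) := one_le_pow₀ (by norm_num)
  have h10 : (10:Int) ^ n = (10:Int) ^ (n - 1) * 10 := by
    rw [← pow_succ]
    congr 1
    omega
  nlinarith

-- str(w) followed by r nines is the decimal string of w·10^r + (10^r − 1)
theorem toChars_pad (w : Int) (m r : Nat) (hm : 1 ≤ m)
    (h1 : (10:Int) ^ (m - 1) ≤ w) (h2 : w ≤ (10:Int) ^ m - 1) :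
    PySem.Int.toChars w ++ List.replicate r '9' =
      PySem.Int.toChars (w * (10:Int) ^ r + ((10:Int) ^ r - 1)) := by
  have hp : (1:Int) ≤ (10:Int) ^ (m - 1) := one_le_pow₀ (by norm_num)
  have hr1 : (1:Int) ≤ (10:Int) ^ r := one_le_pow₀ (by norm_num)
  have hr0 : (0:Int) < (10:Int) ^ r := by positivity
  have hw0 : (0:Int) ≤ w := by linarith
  have hmul1 : (10:Int) ^ (m - 1) * (10:Int) ^ r ≤ w * (10:Int) ^ r :=
    mul_le_mul_of_nonneg_right h1 (le_of_lt hr0)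
  have hmul2 : w * (10:Int) ^ r ≤ ((10:Int) ^ m - 1) * (10:Int) ^ r :=
    mul_le_mul_of_nonneg_right h2 (le_of_lt hr0)
  have hpa : (10:Int) ^ (m - 1) * (10:Int) ^ r = (10:Int) ^ (m + r - 1) := by
    rw [← pow_add]
    congr 1
    omega
  have hpb : (10:Int) ^ m * (10:Int) ^ r = (10:Int) ^ (m + r) := by
    rw [← pow_add]
  have hu1 : (10:Int) ^ (m + r - 1) ≤ w * (10:Int) ^ r + ((10:Int) ^ r - 1) := by
    rw [← hpa]
    linarith
  have hu2 : w * (10:Int) ^ r + ((10:Int) ^ r - 1) ≤ (10:Int) ^ (m + r) - 1 := by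
    have : ((10:Int) ^ m - 1) * (10:Int) ^ r = (10:Int) ^ (m + r) - (10:Int) ^ r := by
      rw [sub_mul, one_mul, hpb]
    linarith
  have hu0 : (0:Int) ≤ w * (10:Int) ^ r + ((10:Int) ^ r - 1) := by
    have := mul_nonneg hw0 (le_of_lt hr0)
    linarith
  have hlw : (PySem.Int.toChars w).length = m := sv_length hm h1 h2
  have hlu : (PySem.Int.toChars (w * (10:Int) ^ r + ((10:Int) ^ r - 1))).length = m + r :=
    sv_length (by omega) hu1 hu2
  apply eq_of_val_eq
  · intro c hc
    rcases List.mem_append.mp hc with hc | hc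
    · exact sv_digs hw0 c hc
    · exact digs_replicate_nine r c hc
  · exact sv_digs hu0
  · rw [List.length_append, hlw, List.length_replicate, hlu]
  · rw [val_append, sv_val hw0, val_replicate_nine, List.length_replicate, sv_val hu0]

-- casting 10^j between Nat and Int
theorem cast_pow10 (j : Nat) : (((10:Nat) ^ j : Nat) : Int) = (10:Int) ^ j := by
  push_cast
  ring

-- ---------- the equal-length case ----------

set_option maxHeartbeats 2000000 in
theorem eq_case (n : Nat) (k : Int) (t : List Char) (hn : 1 ≤ n) (hk : 1 ≤ k)
    (hEq : (n : Int) * k = (t.length : Int)) :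
    bsA k t ((10:Int) ^ (n - 1)) ((10:Int) ^ n - 1) (-1) =
      (match buildLoop (t.take n) (lexLt t (List.flatten (List.replicate k.toNat (t.take n)))) n 0 0 with
       | some v => v
       | none => -1) := by
  have hone : (1:Int) ≤ (10:Int) ^ (n - 1) := one_le_pow₀ (by norm_num)
  have hnt : n ≤ t.length := by
    have h1 : (n : Int) * 1 ≤ (n : Int) * k :=
      mul_le_mul_of_nonneg_left hk (by positivity)
    have h2 : (n : Int) ≤ (t.length : Int) := by rw [← hEq]; linarith
    exact_mod_cast h2
  set t0 := t.take n with ht0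
  have htl : t0.length = n := by rw [ht0, List.length_take]; omega
  have hklen : k.toNat * t0.length = t.length := by
    have hkc : ((k.toNat : Int)) = k := by omega
    have hcast : ((k.toNat * t0.length : Nat) : Int) = (t.length : Int) := by
      push_cast
      rw [hkc, htl, mul_comm]
      exact hEq
    exact_mod_cast hcast
  have hreplen : (List.flatten (List.replicate k.toNat t0)).length = t.length := by
    rw [flatten_replicate_length]
    exact hklen
  have hsum : n + (t.length - n) = t.length := by omega
  have hsp0 := cmpLoop_split t0 t n n (t.length - n) 0
  rw [hsum] at hsp0
  simp only [Nat.zero_add] at hsp0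
  have hcyc1 : cmpCyclic t0 k t = cmpLoop t0 t n 0 t.length := by
    simp only [cmpCyclic, htl]
    rw [hEq, if_neg (lt_irrefl _), if_neg (lt_irrefl _)]
  have hfirst0 : cmpLoop t0 t n 0 n = 0 := by
    have h := cmpLoop_eq_listCmp t0 t n 0 (by omega) (by omega)
    rw [htl] at h
    rw [h]
    simp only [List.drop_zero]
    rw [List.take_of_length_le (le_of_eq htl), ← ht0]
    exact (listCmp_zero_iff rfl).mpr rfl
  have hcycEq : cmpCyclic t0 k t = cmpLoop t0 t n n (t.length - n) := by
    rw [hcyc1, hsp0, hfirst0, if_pos rfl]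
  have hCtri : cmpCyclic t0 k t = -1 ∨ cmpCyclic t0 k t = 0 ∨ cmpCyclic t0 k t = 1 := by
    rw [hcycEq]; exact cmpLoop_trichot t0 t n _ _
  -- B's string test `head * k > L` is exactly `compare_cyclic(head, k, L) = 1`
  have hRep : (lexLt t (List.flatten (List.replicate k.toNat t0)) = true) ↔
      0 < cmpCyclic t0 k t := by
    rw [lexLt_iff_cmp hreplen.symm]
    have hrc := repCmp t0 k.toNat t hklen.symm
    rw [htl] at hrc
    have hneg := listCmp_neg t (List.flatten (List.replicate k.toNat t0))
    rw [hrc, ← hcyc1] at hneg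
    rcases hCtri with h | h | h <;> rw [h] at hneg ⊢ <;> constructor <;> intro hx <;> omega
  -- characterisation of A's probe, purely lexicographic (L arbitrary)
  have good_iff : ∀ v, (10:Int) ^ (n - 1) ≤ v → v ≤ (10:Int) ^ n - 1 →
      (0 < cmpCyclic (PySem.Int.toChars v) k t ↔
        (listCmp (PySem.Int.toChars v) t0 = 1 ∨
          (PySem.Int.toChars v = t0 ∧ 0 < cmpCyclic t0 k t))) := by
    intro v hv1 hv2
    have hv0 : (0:Int) ≤ v := by linarith
    have hlsv : (PySem.Int.toChars v).length = n := sv_length hn hv1 hv2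
    have hA : cmpCyclic (PySem.Int.toChars v) k t = cmpLoop (PySem.Int.toChars v) t n 0 t.length := by
      simp only [cmpCyclic, hlsv]
      rw [hEq, if_neg (lt_irrefl _), if_neg (lt_irrefl _)]
    have hsp := cmpLoop_split (PySem.Int.toChars v) t n n (t.length - n) 0
    rw [hsum] at hsp
    simp only [Nat.zero_add] at hsp
    have hfirst : cmpLoop (PySem.Int.toChars v) t n 0 n = listCmp (PySem.Int.toChars v) t0 := by
      have h := cmpLoop_eq_listCmp (PySem.Int.toChars v) t n 0 (by omega) (by omega)
      rw [hlsv] at h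
      rw [h]
      simp only [List.drop_zero]
      rw [List.take_of_length_le (le_of_eq hlsv), ← ht0]
    rw [hA, hsp, hfirst]
    have h00 : listCmp t0 t0 = 0 := (listCmp_zero_iff rfl).mpr rfl
    rcases listCmp_trichot (PySem.Int.toChars v) t0 with hc | hc | hc
    · rw [hc, if_neg (by norm_num)]
      constructor
      · intro hx; norm_num at hx
      · rintro (hx | ⟨hx, _⟩)
        · omega
        · rw [hx] at hc; omega
    · have hEq2 : PySem.Int.toChars v = t0 := (listCmp_zero_iff (by rw [hlsv, htl])).mp hc
      rw [hc, if_pos rfl, hEq2, ← hcycEq]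
      constructor
      · intro hx; exact Or.inr ⟨rfl, hx⟩
      · rintro (hx | ⟨_, hx⟩)
        · omega
        · exact hx
    · rw [hc, if_neg (by norm_num)]
      constructor
      · intro _; exact Or.inl rfl
      · intro _; norm_num
  -- A's probe is monotone in the candidate
  have hmono : ∀ v v', (10:Int) ^ (n - 1) ≤ v → v ≤ v' → v' ≤ (10:Int) ^ n - 1 →
      0 < cmpCyclic (PySem.Int.toChars v) k t → 0 < cmpCyclic (PySem.Int.toChars v') k t := by
    intro v v' hv1 hvv hv2 hPv
    rcases eq_or_lt_of_le hvv with he | hlt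
    · rw [← he]; exact hPv
    · have hv'1 : (10:Int) ^ (n - 1) ≤ v' := le_trans hv1 hvv
      have hvhi : v ≤ (10:Int) ^ n - 1 := le_trans hvv hv2
      have hv0 : (0:Int) ≤ v := by linarith
      have hv'0 : (0:Int) ≤ v' := by linarith
      have hl1 := sv_length hn hv1 hvhi
      have hl2 := sv_length hn hv'1 hv2
      have hgt : listCmp (PySem.Int.toChars v') (PySem.Int.toChars v) = 1 :=
        (listCmp_one_val (sv_digs hv'0) (sv_digs hv0) (by rw [hl1, hl2])).mpr
          (by rw [sv_val hv0, sv_val hv'0]; exact hlt)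
      rw [good_iff v hv1 hvhi] at hPv
      rw [good_iff v' hv'1 hv2]
      rcases hPv with hx | ⟨hx, _⟩
      · exact Or.inl (listCmp_trans_one hgt hx)
      · exact Or.inl (by rw [← hx]; exact hgt)
  -- the inner-loop condition for a candidate prefix w with r nines appended
  have hF : ∀ (i r : Nat) (w : Int), i + (r + 1) = n →
      (10:Int) ^ i ≤ w → w ≤ (10:Int) ^ (i + 1) - 1 →
      ((lexLt t0 (PySem.Int.toChars w ++ List.replicate r '9') ||
        (lexLt t (List.flatten (List.replicate k.toNat t0)) &&
          decide ((PySem.Int.toChars w ++ List.replicate r '9') = t0))) = true ↔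
        0 < cmpCyclic (PySem.Int.toChars (w * (10:Int) ^ r + ((10:Int) ^ r - 1))) k t) := by
    intro i r w hir hw1 hw2
    have hpad := toChars_pad w (i + 1) r (by omega) (by simpa using hw1) hw2
    have hr0 : (0:Int) < (10:Int) ^ r := by positivity
    have hu1 : (10:Int) ^ (n - 1) ≤ w * (10:Int) ^ r + ((10:Int) ^ r - 1) := by
      have hmul : (10:Int) ^ i * (10:Int) ^ r ≤ w * (10:Int) ^ r :=
        mul_le_mul_of_nonneg_right hw1 (le_of_lt hr0)
      have hpp : (10:Int) ^ i * (10:Int) ^ r = (10:Int) ^ (n - 1) := by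
        rw [← pow_add]
        congr 1
        omega
      linarith
    have hu2 : w * (10:Int) ^ r + ((10:Int) ^ r - 1) ≤ (10:Int) ^ n - 1 := by
      have hmul : w * (10:Int) ^ r ≤ ((10:Int) ^ (i + 1) - 1) * (10:Int) ^ r :=
        mul_le_mul_of_nonneg_right hw2 (le_of_lt hr0)
      have hpp : ((10:Int) ^ (i + 1) - 1) * (10:Int) ^ r = (10:Int) ^ n - (10:Int) ^ r := by
        rw [sub_mul, one_mul, ← pow_add]
        congr 2
        omega
      linarith
    have hlu : (PySem.Int.toChars (w * (10:Int) ^ r + ((10:Int) ^ r - 1))).length = n :=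
      sv_length hn hu1 hu2
    rw [good_iff _ hu1 hu2, hpad]
    have hlex : lexLt t0 (PySem.Int.toChars (w * (10:Int) ^ r + ((10:Int) ^ r - 1))) = true ↔
        listCmp (PySem.Int.toChars (w * (10:Int) ^ r + ((10:Int) ^ r - 1))) t0 = 1 := by
      rw [lexLt_iff_cmp (by rw [htl, hlu])]
      have hneg := listCmp_neg t0 (PySem.Int.toChars (w * (10:Int) ^ r + ((10:Int) ^ r - 1)))
      rcases listCmp_trichot (PySem.Int.toChars (w * (10:Int) ^ r + ((10:Int) ^ r - 1))) t0
        with h | h | h <;> rw [h] at hneg ⊢ <;> constructor <;> intro hx <;> omega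
    simp only [Bool.or_eq_true, Bool.and_eq_true, decide_eq_true_eq]
    constructor
    · rintro (h | ⟨h1, h2⟩)
      · exact Or.inl (hlex.mp h)
      · exact Or.inr ⟨h2, hRep.mp h1⟩
    · rintro (h | ⟨h1, h2⟩)
      · exact Or.inl (hlex.mpr h)
      · exact Or.inr ⟨hRep.mpr h2, h1⟩
  by_cases hPhi : 0 < cmpCyclic (PySem.Int.toChars ((10:Int) ^ n - 1)) k t
  · -- some base works: A's search and B's construction both find the least one
    haveI : DecidablePred (fun v : Int =>
        (10:Int) ^ (n - 1) ≤ v ∧ 0 < cmpCyclic (PySem.Int.toChars v) k t) :=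
      fun v => by infer_instance
    obtain ⟨M, ⟨hMlo, hMP⟩, hMmin⟩ :=
      Int.exists_least_of_bdd
        (P := fun v : Int => (10:Int) ^ (n - 1) ≤ v ∧ 0 < cmpCyclic (PySem.Int.toChars v) k t)
        ⟨(10:Int) ^ (n - 1), fun z hz => hz.1⟩
        ⟨(10:Int) ^ n - 1, pow_lo_le_hi n hn, hPhi⟩
    have hMhi : M ≤ (10:Int) ^ n - 1 := hMmin _ ⟨pow_lo_le_hi n hn, hPhi⟩
    have hthr : ∀ v, (10:Int) ^ (n - 1) ≤ v → v ≤ (10:Int) ^ n - 1 →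
        (0 < cmpCyclic (PySem.Int.toChars v) k t ↔ M ≤ v) := by
      intro v hv1 hv2
      constructor
      · intro h; exact hMmin v ⟨hv1, h⟩
      · intro h; exact hmono M v hMlo h hv2 hMP
    rw [bsA_found k t M _ _ _ hMlo hMhi hthr]
    -- B's side: the greedy loop reconstructs M digit by digit
    set Mn := M.toNat with hMn
    have hM0 : (0:Int) ≤ M := by linarith
    have hMcast : ((Mn : Nat) : Int) = M := Int.toNat_of_nonneg hM0
    have hMn1 : (10:Nat) ^ (n - 1) ≤ Mn := by
      have := cast_pow10 (n - 1)
      omega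
    have hMn2 : Mn < (10:Nat) ^ n := by
      have := cast_pow10 n
      omega
    -- the inner loop finds the next digit of M
    have hinner : ∀ (i r : Nat) (v : Int) (fuel d : Nat), i + (r + 1) = n →
        v = ((Mn / 10 ^ (r + 1) : Nat) : Int) →
        (1 ≤ d ∨ 1 ≤ i) → d + fuel = 10 →
        10 * v + (d : Int) ≤ ((Mn / 10 ^ r : Nat) : Int) →
        innerLoop t0 (lexLt t (List.flatten (List.replicate k.toNat t0))) r v d fuel =
          some ((Mn / 10 ^ r : Nat) : Int) := by
      intro i r v fuel
      induction fuel with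
      | zero =>
        intro d hir hv hd1 hd10 hdT
        exfalso
        have hdd : Mn / 10 ^ r / 10 = Mn / 10 ^ (r + 1) := by
          rw [Nat.div_div_eq_div_mul, ← pow_succ]
        have hub : Mn / 10 ^ r ≤ 10 * (Mn / 10 ^ (r + 1)) + 9 := by
          rw [← hdd]
          omega
        omega
      | succ fuel ih =>
        intro d hir hv hd1 hd10 hdT
        have hd9 : d ≤ 9 := by omega
        have hvlt : v < (10:Int) ^ i := by
          have hppn : (10:Nat) ^ i * 10 ^ (r + 1) = 10 ^ n := by
            rw [← pow_add, hir]
          have : Mn / 10 ^ (r + 1) < 10 ^ i :=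
            (Nat.div_lt_iff_lt_mul (by positivity)).mpr (by omega)
          have hc := cast_pow10 i
          omega
        have hwhi : 10 * v + (d : Int) ≤ (10:Int) ^ (i + 1) - 1 := by
          have : (10:Int) ^ (i + 1) = 10 * (10:Int) ^ i := by ring
          omega
        have hwlo : (10:Int) ^ i ≤ 10 * v + (d : Int) := by
          by_cases hi0 : i = 0
          · subst hi0
            have hd' : 1 ≤ d := by omega
            have hvz : Mn / 10 ^ (r + 1) = 0 := Nat.div_eq_of_lt (by
              rw [show r + 1 = n by omega]
              exact hMn2)
            rw [hv, hvz]
            simp only [pow_zero]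
            push_cast
            omega
          · have hvge : (10:Nat) ^ (n - 1) / 10 ^ (r + 1) ≤ Mn / 10 ^ (r + 1) :=
              Nat.div_le_div_right hMn1
            have hpd : (10:Nat) ^ (n - 1) / 10 ^ (r + 1) = 10 ^ (i - 1) := by
              rw [Nat.pow_div (by omega) (by omega)]
              congr 1
              omega
            have hc := cast_pow10 (i - 1)
            have h10 : (10:Int) ^ i = 10 * (10:Int) ^ (i - 1) := by
              rw [← pow_succ']
              congr 1
              omega
            rw [hv]
            rw [hpd] at hvge
            omega
        have hFw := hF i r (10 * v + (d : Int)) hir hwlo hwhi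
        have hr0 : (0:Int) < (10:Int) ^ r := by positivity
        -- the condition holds iff the next digit is large enough
        have hTiff : (0 < cmpCyclic
              (PySem.Int.toChars ((10 * v + (d : Int)) * (10:Int) ^ r + ((10:Int) ^ r - 1))) k t) ↔
            ((Mn / 10 ^ r : Nat) : Int) ≤ 10 * v + (d : Int) := by
          have hu1 : (10:Int) ^ (n - 1) ≤ (10 * v + (d : Int)) * (10:Int) ^ r + ((10:Int) ^ r - 1) := by
            have hmul : (10:Int) ^ i * (10:Int) ^ r ≤ (10 * v + (d : Int)) * (10:Int) ^ r :=
              mul_le_mul_of_nonneg_right hwlo (le_of_lt hr0)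
            have hpp : (10:Int) ^ i * (10:Int) ^ r = (10:Int) ^ (n - 1) := by
              rw [← pow_add]
              congr 1
              omega
            linarith
          have hu2 : (10 * v + (d : Int)) * (10:Int) ^ r + ((10:Int) ^ r - 1) ≤ (10:Int) ^ n - 1 := by
            have hmul : (10 * v + (d : Int)) * (10:Int) ^ r ≤ ((10:Int) ^ (i + 1) - 1) * (10:Int) ^ r :=
              mul_le_mul_of_nonneg_right hwhi (le_of_lt hr0)
            have hpp : ((10:Int) ^ (i + 1) - 1) * (10:Int) ^ r = (10:Int) ^ n - (10:Int) ^ r := by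
              rw [sub_mul, one_mul, ← pow_add]
              congr 2
              omega
            linarith
          rw [hthr _ hu1 hu2]
          -- M ≤ w·10^r + (10^r − 1)  ↔  Mn / 10^r ≤ w   (all quantities nonneg)
          have hwpos : (0:Int) ≤ 10 * v + (d : Int) := by
            have : (0:Int) < (10:Int) ^ i := by positivity
            linarith
          set w := 10 * v + (d : Int) with hw
          have hwn : ((w.toNat : Nat) : Int) = w := Int.toNat_of_nonneg hwpos
          have hring : (w + 1) * (10:Int) ^ r = w * (10:Int) ^ r + (10:Int) ^ r := by ring
          have hcast2 : (((w.toNat + 1) * 10 ^ r : Nat) : Int) = (w + 1) * (10:Int) ^ r := by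
            push_cast
            rw [hwn]
          have hp0 : 0 < (10:Nat) ^ r := by positivity
          constructor
          · intro h
            have h2 : M + 1 ≤ (w + 1) * (10:Int) ^ r := by
              rw [hring]; linarith
            have h3 : Mn + 1 ≤ (w.toNat + 1) * 10 ^ r := by
              have h2' := h2
              rw [← hMcast, ← hcast2] at h2'
              exact_mod_cast h2'
            have h4 : Mn / 10 ^ r < w.toNat + 1 :=
              (Nat.div_lt_iff_lt_mul hp0).mpr (Nat.lt_of_succ_le h3)
            have h5 : Mn / 10 ^ r ≤ w.toNat := Nat.lt_succ_iff.mp h4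
            calc ((Mn / 10 ^ r : Nat) : Int) ≤ ((w.toNat : Nat) : Int) := by exact_mod_cast h5
              _ = w := hwn
          · intro h
            have h5 : Mn / 10 ^ r ≤ w.toNat := by
              have h' : ((Mn / 10 ^ r : Nat) : Int) ≤ ((w.toNat : Nat) : Int) := by
                rw [hwn]; exact h
              exact_mod_cast h'
            have h4 : Mn < (w.toNat + 1) * 10 ^ r :=
              (Nat.div_lt_iff_lt_mul hp0).mp (Nat.lt_succ_of_le h5)
            have h3 : ((Mn : Nat) : Int) + 1 ≤ (((w.toNat + 1) * 10 ^ r : Nat) : Int) := by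
              exact_mod_cast Nat.succ_le_of_lt h4
            rw [hcast2, hMcast] at h3
            linarith [hring]
        by_cases hcond : (lexLt t0 (PySem.Int.toChars (10 * v + (d : Int)) ++ List.replicate r '9') ||
            (lexLt t (List.flatten (List.replicate k.toNat t0)) &&
              decide ((PySem.Int.toChars (10 * v + (d : Int)) ++ List.replicate r '9') = t0))) = true
        · have hge := hTiff.mp (hFw.mp hcond)
          simp only [innerLoop]
          rw [if_pos hcond]
          congr 1
          omega
        · have hlt : ¬ ((Mn / 10 ^ r : Nat) : Int) ≤ 10 * v + (d : Int) :=
            fun h => hcond (hFw.mpr (hTiff.mpr h))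
          simp only [innerLoop]
          rw [if_neg hcond]
          exact ih (d + 1) hir hv (Or.inl (by omega)) (by omega) (by
            have hca : ((d + 1 : Nat) : Int) = (d : Int) + 1 := by push_cast; ring
            omega)
    -- the outer loop keeps the invariant  v = Mn / 10^rem
    have houter : ∀ (rem i : Nat) (v : Int), i + rem = n →
        v = ((Mn / 10 ^ rem : Nat) : Int) →
        buildLoop t0 (lexLt t (List.flatten (List.replicate k.toNat t0))) rem i v = some M := by
      intro rem
      induction rem with
      | zero =>
        intro i v _ hv
        simp only [buildLoop]
        rw [hv]
        simp [hMcast]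
      | succ rem ih =>
        intro i v hir hv
        have hstep : innerLoop t0 (lexLt t (List.flatten (List.replicate k.toNat t0))) rem v
            (if i = 0 then 1 else 0) (if i = 0 then 9 else 10) =
            some ((Mn / 10 ^ rem : Nat) : Int) := by
          have hdd : Mn / 10 ^ rem / 10 = Mn / 10 ^ (rem + 1) := by
            rw [Nat.div_div_eq_div_mul, ← pow_succ]
          have hlow : 10 * (Mn / 10 ^ (rem + 1)) ≤ Mn / 10 ^ rem := by
            rw [← hdd]
            omega
          by_cases hi : i = 0
          · subst hi
            have hvz : Mn / 10 ^ (rem + 1) = 0 := Nat.div_eq_of_lt (by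
              rw [show rem + 1 = n by omega]
              exact hMn2)
            have hT1 : 1 ≤ Mn / 10 ^ rem := by
              rw [show rem = n - 1 by omega]
              exact (Nat.one_le_div_iff (by positivity)).mpr hMn1
            simp only [reduceIte]
            exact hinner 0 rem v 9 1 (by omega) hv (Or.inl (by omega)) (by omega)
              (by rw [hv, hvz]; norm_num; exact_mod_cast hT1)
          · simp only [if_neg hi]
            exact hinner i rem v 10 0 (by omega) hv (Or.inr (by omega)) (by omega)
              (by rw [hv]; norm_num; exact_mod_cast hlow)
        simp only [buildLoop]
        rw [hstep]
        exact ih (i + 1) _ (by omega) rfl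
    rw [houter n 0 0 (by omega) (by
      rw [Nat.div_eq_of_lt hMn2]
      simp)]
  · -- no base works: A's search returns -1 and B's first digit search fails
    rw [bsA_none k t _ _ _ (fun v hv1 hv2 hPv =>
      hPhi (hmono v ((10:Int) ^ n - 1) hv1 hv2 le_rfl hPv))]
    have hinnone : ∀ (fuel d : Nat), 1 ≤ d → d + fuel = 10 →
        innerLoop t0 (lexLt t (List.flatten (List.replicate k.toNat t0))) (n - 1) 0 d fuel = none := by
      intro fuel
      induction fuel with
      | zero => intro d _ _; rfl
      | succ fuel ih =>
        intro d hd1 hd10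
        have hd9 : d ≤ 9 := by omega
        have hwlo : (10:Int) ^ 0 ≤ 10 * 0 + (d : Int) := by simp; omega
        have hwhi : 10 * 0 + (d : Int) ≤ (10:Int) ^ (0 + 1) - 1 := by push_cast; omega
        have hFw := hF 0 (n - 1) (10 * 0 + (d : Int)) (by omega) hwlo hwhi
        have hcond : ¬ ((lexLt t0 (PySem.Int.toChars (10 * 0 + (d : Int)) ++ List.replicate (n - 1) '9') ||
            (lexLt t (List.flatten (List.replicate k.toNat t0)) &&
              decide ((PySem.Int.toChars (10 * 0 + (d : Int)) ++ List.replicate (n - 1) '9') = t0))) = true) := by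
          intro hc
          have hPu := hFw.mp hc
          have hu1 : (10:Int) ^ (n - 1) ≤ (10 * 0 + (d : Int)) * (10:Int) ^ (n - 1) + ((10:Int) ^ (n - 1) - 1) := by
            have hd1' : (1:Int) ≤ (d : Int) := by exact_mod_cast hd1
            nlinarith
          have hu2 : (10 * 0 + (d : Int)) * (10:Int) ^ (n - 1) + ((10:Int) ^ (n - 1) - 1) ≤ (10:Int) ^ n - 1 := by
            have hd9' : ((d : Int)) ≤ 9 := by exact_mod_cast hd9
            have hpp : (10:Int) ^ n = 10 * (10:Int) ^ (n - 1) := by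
              rw [← pow_succ']
              congr 1
              omega
            nlinarith
          exact hPhi (hmono _ _ hu1 (by linarith) le_rfl hPu)
        simp only [innerLoop]
        rw [if_neg hcond]
        exact ih (d + 1) (by omega) (by omega)
    have hbuild : buildLoop t0 (lexLt t (List.flatten (List.replicate k.toNat t0))) n 0 0 = none := by
      obtain ⟨m, hm⟩ : ∃ m, n = m + 1 := ⟨n - 1, by omega⟩
      rw [hm]
      simp only [buildLoop, reduceIte]
      rw [show m = n - 1 by omega, hinnone 9 1 (by omega) (by omega)]
    rw [hbuild]

-- ---------- assembly ----------

theorem find_min_base_greater_eq_alt (N k : Int) (L : String) :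
    find_min_base_greater N k L = find_min_base_greater_alt N k L := by
  unfold find_min_base_greater find_min_base_greater_alt
  by_cases h1 : k * N < (L.toList.length : Int)
  · rw [if_pos h1, if_pos h1]
  · rw [if_neg h1, if_neg h1]
    by_cases hN : N ≤ 0
    · rw [if_pos hN, if_pos (Or.inl (by omega : N < 1))]
    · rw [if_neg hN]
      by_cases hk : k < 1
      · rw [if_pos (Or.inr hk)]
        have hk0 : k = 0 := by
          by_contra hne
          have hkn : k ≤ -1 := by omega
          have h2 : k * N ≤ (-1) * N := mul_le_mul_of_nonneg_right hkn (by omega)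
          have h3 : (0:Int) ≤ (L.toList.length : Int) := by positivity
          omega
        subst hk0
        have hlen : L.toList = [] := by
          have h3 : ¬ (0:Int) < (L.toList.length : Int) := by simpa using h1
          have h4 : L.toList.length = 0 := by omega
          exact List.length_eq_zero_iff.mp h4
        rw [hlen]
        apply bsA_none
        intro v _ _
        simp [cmpCyclic, cmpLoop]
      · rw [if_neg (by omega : ¬ (N < 1 ∨ k < 1))]
        have hN1 : 1 ≤ N := by omega
        have hk1 : 1 ≤ k := by omega
        have hn1 : 1 ≤ N.toNat := by omega
        have hexp : (N - 1).toNat = N.toNat - 1 := by omega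
        rw [hexp]
        by_cases hgt : (L.toList.length : Int) < k * N
        · rw [if_pos hgt]
          apply bsA_found _ _ ((10:Int) ^ (N.toNat - 1)) _ _ _ le_rfl (pow_lo_le_hi _ hn1)
          intro v hv1 hv2
          have hlsv : (PySem.Int.toChars v).length = N.toNat := sv_length hn1 hv1 hv2
          constructor
          · intro _; exact hv1
          · intro _
            have hlt : (L.toList.length : Int) < (N.toNat : Int) * k := by
              rw [mul_comm]
              have h3 : ((N.toNat : Int)) = N := by omega
              rw [h3]; exact hgt
            simp only [cmpCyclic, hlsv]
            rw [if_neg (not_lt.mpr (le_of_lt hlt)), if_pos hlt]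
            norm_num
        · rw [if_neg hgt]
          have hEq : (N.toNat : Int) * k = (L.toList.length : Int) := by
            have h2 : k * N = (L.toList.length : Int) :=
              le_antisymm (not_lt.mp hgt) (not_lt.mp h1)
            have h3 : ((N.toNat : Int)) = N := by omega
            rw [h3, mul_comm]; exact h2
          exact eq_case N.toNat k L.toList hn1 hk1 hEq

-- ===== VERDICT =====
theorem find_min_base_greater_spec : Claim_equal_find_min_base_greater := by
  intro N k L _
  exact find_min_base_greater_eq_alt N k L
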